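-- pv_equiv track=rewrite | github.com/dsimonkay/advent-of-code-2024 | december 12/puzzle2.py | calculate_budget_fence_price_of
-- ===== SOURCE A (Python) =====
-- from typing import Dict, List, Tuple
--
-- def count_corners(squares: List[Tuple[int, int]], corner_specs: List) -> int:
--     corners = 0
--
--     for square in squares:
--         square_qualifies_as_corner = True
--         for (d_row, d_col), square_needs_to_exist in corner_specs:
--             candidate = (square[0] + d_row, square[1] + d_col)
--             complies_with_spec = (not square_needs_to_exist and candidate not in squares) or (square_needs_to_exist and candidate in squares)
--             square_qualifies_as_corner = complies_with_spec
--             if not square_qualifies_as_corner: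
--                 break
--
--         if square_qualifies_as_corner:
--            corners += 1
--
--     return corners
--
-- def calculate_budget_fence_price_of(plots: List[List[Tuple[int,int]]]) -> int:
--     total_price = 0
--
--     # corner specifications
--     top_left_outer_corner     = [((-1, 0), False), ((0, -1), False), ((-1, -1), False)]
--     top_right_outer_corner    = [((-1, 0), False), ((0, +1), False), ((-1, +1), False)]
--     bottom_right_outer_corner = [((+1, 0), False), ((0, +1), False), ((+1, +1), False)]
--     bottom_left_outer_corner  = [((+1, 0), False), ((0, -1), False), ((+1, -1), False)]
--
--     top_left_inner_corner     = [((0, +1), True),  ((+1, 0), True),  ((+1, +1), False)]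
--     top_right_inner_corner    = [((0, -1), True),  ((+1, 0), True),  ((+1, -1), False)]
--     bottom_right_inner_corner = [((-1, 0), True),  ((0, -1), True),  ((-1, -1), False)]
--     bottom_left_inner_corner  = [((-1, 0), True),  ((0, +1), True),  ((-1, +1), False)]
--
--     dumb_bottom_right_corner  = [((0, -1), False), ((+1, 0), False), ((+1, -1), True)]
--     dumb_top_left_corner      = [((-1, 0), False), ((0, +1), False), ((-1, +1), True)]
--     dumb_bottom_left_corner   = [((0, +1), False), ((+1, 0), False), ((+1, +1), True)]
--     dumb_top_right_corner     = [((-1, 0), False), ((0, -1), False), ((-1, -1), True)]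
--
--     for plot in plots:
--         distinct_plot_sides = 0
--
--         if len(plot) < 3:
--             distinct_plot_sides = 4
--
--         else:
--             # Counting the corners instead of sides.
--             corner_count = 0
--
--             # outer corners
--             corner_count += count_corners(plot, top_left_outer_corner)
--             corner_count += count_corners(plot, top_right_outer_corner)
--             corner_count += count_corners(plot, bottom_right_outer_corner)
--             corner_count += count_corners(plot, bottom_left_outer_corner)
--
--             # inner corners
--             corner_count += count_corners(plot, top_left_inner_corner)
--             corner_count += count_corners(plot, top_right_inner_corner)
--             corner_count += count_corners(plot, bottom_left_inner_corner)
--             corner_count += count_corners(plot, bottom_right_inner_corner)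
--
--             # dumb inner corners
--             corner_count += count_corners(plot, dumb_bottom_right_corner)
--             corner_count += count_corners(plot, dumb_top_left_corner)
--             corner_count += count_corners(plot, dumb_bottom_left_corner)
--             corner_count += count_corners(plot, dumb_top_right_corner)
--
--             distinct_plot_sides = corner_count
--
--         total_price += distinct_plot_sides * len(plot)
--
--     return total_price
-- ===== SOURCE B (Python) =====
-- from typing import List, Tuple
--
-- def calculate_budget_fence_price_of(plots: List[List[Tuple[int, int]]]) -> int:
--     total_price = 0
--     for plot in plots:
--         if len(plot) < 3:
--             sides = 4
--         else:
--             sides = 0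
--             for (row, col) in plot:
--                 for d_row in (-1, 1):
--                     for d_col in (-1, 1):
--                         vert = (row + d_row, col) in plot
--                         horiz = (row, col + d_col) in plot
--                         if not vert and not horiz:
--                             sides += 1  # convex corner (diagonal irrelevant)
--                         elif vert and horiz and (row + d_row, col + d_col) not in plot:
--                             sides += 1  # concave corner
--         total_price += sides * len(plot)
--     return total_price
-- ===== Notes on version B (the rewrite author's own statement) =====
-- stated objective: simpler
-- what changed: Replaces A's twelve separate corner-spec table scans (count_corners called 12 times per plot) with a single pass over the plot's squares that checks, for each of the 4 diagonal directions, the convex-corner and concave-corner conditions directly.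
import Mathlib
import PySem

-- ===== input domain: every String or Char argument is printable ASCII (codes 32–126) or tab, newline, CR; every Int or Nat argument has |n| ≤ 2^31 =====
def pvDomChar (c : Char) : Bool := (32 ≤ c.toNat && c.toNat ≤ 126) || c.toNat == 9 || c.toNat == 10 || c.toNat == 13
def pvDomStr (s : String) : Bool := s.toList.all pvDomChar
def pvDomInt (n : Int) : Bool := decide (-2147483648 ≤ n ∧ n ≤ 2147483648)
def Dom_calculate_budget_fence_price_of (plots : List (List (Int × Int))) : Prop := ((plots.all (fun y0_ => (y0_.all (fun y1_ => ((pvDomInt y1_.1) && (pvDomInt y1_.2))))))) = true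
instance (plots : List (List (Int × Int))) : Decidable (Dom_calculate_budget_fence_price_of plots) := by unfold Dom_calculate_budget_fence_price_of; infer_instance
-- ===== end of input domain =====

set_option maxHeartbeats 1000000


-- B replaces A's twelve corner-spec table scans by a single pass over the squares
-- checking the four diagonal directions (convex / concave corner test); objective: simpler.

-- ===== PORT A =====
-- inner loop of count_corners: runs through the specs, breaking on the first failure
def checkSpecs (squares : List (Int × Int)) (square : Int × Int) : List ((Int × Int) × Bool) → Bool
  | [] => true
  | (d, need) :: rest =>
      let candidate : Int × Int := (square.1 + d.1, square.2 + d.2)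
      let complies := (!need && !(squares.contains candidate)) || (need && squares.contains candidate)
      if complies then checkSpecs squares square rest else false

def count_corners (squares : List (Int × Int)) (corner_specs : List ((Int × Int) × Bool)) : Int :=
  squares.foldl (fun corners square =>
    if checkSpecs squares square corner_specs then corners + 1 else corners) 0

def calculate_budget_fence_price_of (plots : List (List (Int × Int))) : Int :=
  let top_left_outer_corner     : List ((Int × Int) × Bool) := [((-1, 0), false), ((0, -1), false), ((-1, -1), false)]
  let top_right_outer_corner    : List ((Int × Int) × Bool) := [((-1, 0), false), ((0, 1), false), ((-1, 1), false)]
  let bottom_right_outer_corner : List ((Int × Int) × Bool) := [((1, 0), false), ((0, 1), false), ((1, 1), false)]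
  let bottom_left_outer_corner  : List ((Int × Int) × Bool) := [((1, 0), false), ((0, -1), false), ((1, -1), false)]
  let top_left_inner_corner     : List ((Int × Int) × Bool) := [((0, 1), true), ((1, 0), true), ((1, 1), false)]
  let top_right_inner_corner    : List ((Int × Int) × Bool) := [((0, -1), true), ((1, 0), true), ((1, -1), false)]
  let bottom_right_inner_corner : List ((Int × Int) × Bool) := [((-1, 0), true), ((0, -1), true), ((-1, -1), false)]
  let bottom_left_inner_corner  : List ((Int × Int) × Bool) := [((-1, 0), true), ((0, 1), true), ((-1, 1), false)]
  let dumb_bottom_right_corner  : List ((Int × Int) × Bool) := [((0, -1), false), ((1, 0), false), ((1, -1), true)]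
  let dumb_top_left_corner      : List ((Int × Int) × Bool) := [((-1, 0), false), ((0, 1), false), ((-1, 1), true)]
  let dumb_bottom_left_corner   : List ((Int × Int) × Bool) := [((0, 1), false), ((1, 0), false), ((1, 1), true)]
  let dumb_top_right_corner     : List ((Int × Int) × Bool) := [((-1, 0), false), ((0, -1), false), ((-1, -1), true)]
  plots.foldl (fun total_price plot =>
    let distinct_plot_sides : Int :=
      if plot.length < 3 then 4
      else
        count_corners plot top_left_outer_corner
        + count_corners plot top_right_outer_corner
        + count_corners plot bottom_right_outer_corner
        + count_corners plot bottom_left_outer_corner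
        + count_corners plot top_left_inner_corner
        + count_corners plot top_right_inner_corner
        + count_corners plot bottom_left_inner_corner
        + count_corners plot bottom_right_inner_corner
        + count_corners plot dumb_bottom_right_corner
        + count_corners plot dumb_top_left_corner
        + count_corners plot dumb_bottom_left_corner
        + count_corners plot dumb_top_right_corner
    total_price + distinct_plot_sides * plot.length) 0

-- ===== PORT B =====
def calculate_budget_fence_price_of_alt (plots : List (List (Int × Int))) : Int :=
  plots.foldl (fun total_price plot =>
    let sides : Int :=
      if plot.length < 3 then 4
      else
        plot.foldl (fun s sq =>
          ([-1, 1] : List Int).foldl (fun s d_row =>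
            ([-1, 1] : List Int).foldl (fun s d_col =>
              let vert := plot.contains (sq.1 + d_row, sq.2)
              let horiz := plot.contains (sq.1, sq.2 + d_col)
              if !vert && !horiz then s + 1
              else if vert && horiz && !(plot.contains (sq.1 + d_row, sq.2 + d_col)) then s + 1
              else s) s) s) 0
    total_price + sides * plot.length) 0

-- ===== PRECONDITION & SPEC =====
def Spec_calculate_budget_fence_price_of (plots : List (List (Int × Int))) (out : Int) : Prop := out = calculate_budget_fence_price_of_alt plots
instance (plots : List (List (Int × Int))) (out : Int) : Decidable (Spec_calculate_budget_fence_price_of plots out) := by unfold Spec_calculate_budget_fence_price_of; infer_instance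

-- ===== CLAIM (what is proved, stated in full; the proofs are below) =====
def Claim_equal_calculate_budget_fence_price_of : Prop := ∀ (plots : List (List (Int × Int))), Dom_calculate_budget_fence_price_of plots → Spec_calculate_budget_fence_price_of plots (calculate_budget_fence_price_of plots)

-- ===== LEMMAS AND PROOFS =====

theorem checkSpecs_nil (m : List (Int × Int)) (sq : Int × Int) : checkSpecs m sq [] = true := rfl

theorem checkSpecs_cons (m : List (Int × Int)) (sq : Int × Int) (d : Int × Int) (need : Bool) (rest : List ((Int × Int) × Bool)) :
    checkSpecs m sq ((d, need) :: rest)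
      = (((!need && !(m.contains (sq.1 + d.1, sq.2 + d.2))) || (need && m.contains (sq.1 + d.1, sq.2 + d.2)))
          && checkSpecs m sq rest) := by
  simp only [checkSpecs]
  cases ((!need && !(m.contains (sq.1 + d.1, sq.2 + d.2))) || (need && m.contains (sq.1 + d.1, sq.2 + d.2))) <;> simp

-- A's twelve per-square spec indicators, in the order A sums the tables
def aInd (m : List (Int × Int)) (sq : Int × Int) : Int :=
  (if checkSpecs m sq [((-1, 0), false), ((0, -1), false), ((-1, -1), false)] then 1 else 0)
  + (if checkSpecs m sq [((-1, 0), false), ((0, 1), false), ((-1, 1), false)] then 1 else 0)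
  + (if checkSpecs m sq [((1, 0), false), ((0, 1), false), ((1, 1), false)] then 1 else 0)
  + (if checkSpecs m sq [((1, 0), false), ((0, -1), false), ((1, -1), false)] then 1 else 0)
  + (if checkSpecs m sq [((0, 1), true), ((1, 0), true), ((1, 1), false)] then 1 else 0)
  + (if checkSpecs m sq [((0, -1), true), ((1, 0), true), ((1, -1), false)] then 1 else 0)
  + (if checkSpecs m sq [((-1, 0), true), ((0, 1), true), ((-1, 1), false)] then 1 else 0)
  + (if checkSpecs m sq [((-1, 0), true), ((0, -1), true), ((-1, -1), false)] then 1 else 0)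
  + (if checkSpecs m sq [((0, -1), false), ((1, 0), false), ((1, -1), true)] then 1 else 0)
  + (if checkSpecs m sq [((-1, 0), false), ((0, 1), false), ((-1, 1), true)] then 1 else 0)
  + (if checkSpecs m sq [((0, 1), false), ((1, 0), false), ((1, 1), true)] then 1 else 0)
  + (if checkSpecs m sq [((-1, 0), false), ((0, -1), false), ((-1, -1), true)] then 1 else 0)

-- B's per-square contribution for one diagonal direction
def bDir (m : List (Int × Int)) (sq : Int × Int) (d_row d_col : Int) : Int :=
  let vert := m.contains (sq.1 + d_row, sq.2)
  let horiz := m.contains (sq.1, sq.2 + d_col)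
  if !vert && !horiz then 1
  else if vert && horiz && !(m.contains (sq.1 + d_row, sq.2 + d_col)) then 1
  else 0

def bInd (m : List (Int × Int)) (sq : Int × Int) : Int :=
  bDir m sq (-1) (-1) + bDir m sq (-1) 1 + bDir m sq 1 (-1) + bDir m sq 1 1

theorem aInd_eq_bInd (m : List (Int × Int)) (sq : Int × Int) : aInd m sq = bInd m sq := by
  simp only [aInd, bInd, bDir, checkSpecs_cons, checkSpecs_nil, add_zero,
    Bool.not_false, Bool.not_true, Bool.false_and, Bool.true_and, Bool.and_true,
    Bool.false_or, Bool.or_false]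
  cases m.contains (sq.1 + -1, sq.2) <;>
    cases m.contains (sq.1 + 1, sq.2) <;>
      cases m.contains (sq.1, sq.2 + -1) <;>
        cases m.contains (sq.1, sq.2 + 1) <;>
          cases m.contains (sq.1 + -1, sq.2 + -1) <;>
            cases m.contains (sq.1 + -1, sq.2 + 1) <;>
              cases m.contains (sq.1 + 1, sq.2 + -1) <;>
                cases m.contains (sq.1 + 1, sq.2 + 1) <;>
                  simp

theorem count_corners_eq (m : List (Int × Int)) (spec : List ((Int × Int) × Bool)) :
    count_corners m spec = (m.map (fun sq => if checkSpecs m sq spec then (1 : Int) else 0)).sum := by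
  unfold count_corners
  rw [PySem.List.foldl_count_if, PySem.List.sum_map_ite_one_zero]
  simp

theorem bFold_eq (m : List (Int × Int)) :
    (m.foldl (fun s sq =>
      ([-1, 1] : List Int).foldl (fun s d_row =>
        ([-1, 1] : List Int).foldl (fun s d_col =>
          let vert := m.contains (sq.1 + d_row, sq.2)
          let horiz := m.contains (sq.1, sq.2 + d_col)
          if !vert && !horiz then s + 1
          else if vert && horiz && !(m.contains (sq.1 + d_row, sq.2 + d_col)) then s + 1
          else s) s) s) 0)
    = (m.map (bInd m)).sum := by
  have hstep : (fun (s : Int) (sq : Int × Int) =>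
      ([-1, 1] : List Int).foldl (fun s d_row =>
        ([-1, 1] : List Int).foldl (fun s d_col =>
          let vert := m.contains (sq.1 + d_row, sq.2)
          let horiz := m.contains (sq.1, sq.2 + d_col)
          if !vert && !horiz then s + 1
          else if vert && horiz && !(m.contains (sq.1 + d_row, sq.2 + d_col)) then s + 1
          else s) s) s) = fun s sq => s + bInd m sq := by
    funext s sq
    simp only [List.foldl_cons, List.foldl_nil, bInd, bDir]
    split_ifs <;> ring
  rw [hstep, PySem.List.foldl_add]
  simp

theorem plot_sides_eq (m : List (Int × Int)) :
    count_corners m [((-1, 0), false), ((0, -1), false), ((-1, -1), false)]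
    + count_corners m [((-1, 0), false), ((0, 1), false), ((-1, 1), false)]
    + count_corners m [((1, 0), false), ((0, 1), false), ((1, 1), false)]
    + count_corners m [((1, 0), false), ((0, -1), false), ((1, -1), false)]
    + count_corners m [((0, 1), true), ((1, 0), true), ((1, 1), false)]
    + count_corners m [((0, -1), true), ((1, 0), true), ((1, -1), false)]
    + count_corners m [((-1, 0), true), ((0, 1), true), ((-1, 1), false)]
    + count_corners m [((-1, 0), true), ((0, -1), true), ((-1, -1), false)]
    + count_corners m [((0, -1), false), ((1, 0), false), ((1, -1), true)]
    + count_corners m [((-1, 0), false), ((0, 1), false), ((-1, 1), true)]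
    + count_corners m [((0, 1), false), ((1, 0), false), ((1, 1), true)]
    + count_corners m [((-1, 0), false), ((0, -1), false), ((-1, -1), true)]
    = (m.map (bInd m)).sum := by
  simp only [count_corners_eq]
  rw [← PySem.List.sum_map_add_int, ← PySem.List.sum_map_add_int, ← PySem.List.sum_map_add_int,
    ← PySem.List.sum_map_add_int, ← PySem.List.sum_map_add_int, ← PySem.List.sum_map_add_int,
    ← PySem.List.sum_map_add_int, ← PySem.List.sum_map_add_int, ← PySem.List.sum_map_add_int,
    ← PySem.List.sum_map_add_int, ← PySem.List.sum_map_add_int]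
  apply congrArg
  apply List.map_congr_left
  intro sq _
  exact aInd_eq_bInd m sq

-- ===== VERDICT (by name: the statement is the Claim_ definition above) =====
theorem calculate_budget_fence_price_of_spec : Claim_equal_calculate_budget_fence_price_of := by
  intro plots _
  unfold Spec_calculate_budget_fence_price_of
  simp only [calculate_budget_fence_price_of, calculate_budget_fence_price_of_alt]
  congr 1
  funext total plot
  by_cases h : plot.length < 3
  · simp [h]
  · simp only [h, if_false]
    rw [plot_sides_eq plot, bFold_eq plot]
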